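-- pv_equiv track=rewrite | github.com/phanttuan/BaoCaoCaNhan-8PuzzleSolverAI | PhanVietTuan_23110355_BaoCaoCaNhan.py | get_valid_actions_q
-- ===== SOURCE A (Python) =====
-- def get_valid_actions_q(state_tuple):
--     """Kiếm tra các hành động hợp lệ từ trạng thái hiện tại"""
--     state = [list(row) for row in state_tuple]
--     # Tìm vị trí của ô trống (0)
--     blank_row, blank_col = None, None
--     for r in range(3):
--         for c in range(3):
--             if state[r][c] == 0:
--                 blank_row, blank_col = r, c
--                 break
--         if blank_row is not None:
--             break
--
--     valid_actions = []
--     # Check lên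
--     if blank_row > 0:
--         valid_actions.append(0)
--     # Check xuống
--     if blank_row < 2:
--         valid_actions.append(1)
--     # Check trái
--     if blank_col > 0:
--         valid_actions.append(2)
--     # Check phải
--     if blank_col < 2:
--         valid_actions.append(3)
--
--     return valid_actions
-- ===== SOURCE B (Python) =====
-- # Table lookup: the valid actions depend only on the blank's flat index 0..8.
-- _ACTIONS = ([1, 3], [1, 2, 3], [1, 2],
--             [0, 1, 3], [0, 1, 2, 3], [0, 1, 2],
--             [0, 3], [0, 2, 3], [0, 2])
--
--
-- def get_valid_actions_q(state_tuple):
--     flat = [v for row in state_tuple for v in row]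
--     return list(_ACTIONS[flat.index(0)])
-- ===== Notes on version B (the rewrite author's own statement) =====
-- stated objective: simpler
-- what changed: Replaces the nested row/column scan with sentinel breaks and the four boundary checks by a single flat search for the blank plus a precomputed 9-entry lookup table mapping blank index to action list.
-- outside the precondition, e.g. on get_valid_actions_q(((1, 2, 3, 0), (4, 0, 6), (7, 8, 9))): A returns [0, 1, 2, 3], B returns [0, 1, 3]
import Mathlib
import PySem

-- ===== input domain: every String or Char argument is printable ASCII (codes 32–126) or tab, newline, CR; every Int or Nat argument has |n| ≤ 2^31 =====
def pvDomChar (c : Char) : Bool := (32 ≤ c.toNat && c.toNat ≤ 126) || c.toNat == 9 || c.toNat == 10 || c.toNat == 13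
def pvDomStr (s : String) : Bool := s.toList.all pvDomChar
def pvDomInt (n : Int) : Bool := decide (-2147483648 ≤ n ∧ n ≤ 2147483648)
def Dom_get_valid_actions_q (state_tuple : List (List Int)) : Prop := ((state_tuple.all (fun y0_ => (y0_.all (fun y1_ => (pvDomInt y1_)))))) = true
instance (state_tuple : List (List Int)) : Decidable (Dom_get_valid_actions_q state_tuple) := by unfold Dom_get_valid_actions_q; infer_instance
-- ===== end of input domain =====

-- B replaces A's nested row/column scan with sentinel breaks and four boundary checks by a
-- flat search for the blank plus a precomputed 9-entry action table (objective: simpler).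

-- ===== PORT A =====
def get_valid_actions_q (state_tuple : List (List Int)) : List Int :=
  let state := state_tuple.map (fun row => row)
  let pos : Option (Int × Int) :=
    (PySem.List.pyRange 0 3 1).foldl (fun acc r =>
      match acc with
      | some _ => acc
      | none =>
        (PySem.List.pyRange 0 3 1).foldl (fun acc2 c =>
          match acc2 with
          | some _ => acc2
          | none =>
            if ((PySem.List.pyGet? state r).bind (fun row => PySem.List.pyGet? row c)) = some 0
            then some (r, c) else none) none) none
  match pos with
  | some (br, bc) =>
    ((((([] : List Int) ++ (if br > 0 then [0] else [])) ++ (if br < 2 then [1] else []))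
       ++ (if bc > 0 then [2] else [])) ++ (if bc < 2 then [3] else []))
  | none => []

-- ===== PORT B =====
def pvActionsTable : List (List Int) :=
  [[1, 3], [1, 2, 3], [1, 2], [0, 1, 3], [0, 1, 2, 3], [0, 1, 2], [0, 3], [0, 2, 3], [0, 2]]

def get_valid_actions_q_alt (state_tuple : List (List Int)) : List Int :=
  let flat := state_tuple.flatMap (fun row => row)
  match PySem.List.index? flat 0 with
  | some i => (pvActionsTable[i]?).getD []
  | none => []

-- ===== PRECONDITION & SPEC =====
-- Pre_: the blank is found by the 3x3 scan at some cell (r,c) with every earlier row a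
-- zero-free triple and the earlier cells of its own row nonzero. Excluded inputs on which
-- A still returns are jagged grids whose over-long earlier rows A silently ignores beyond
-- column 2 (an artefact of the fixed 3x3 scan, which B's flat search does not reproduce);
-- on all other excluded inputs A raises (IndexError on missing cells, TypeError when the
-- scanned region has no 0).
def Pre_get_valid_actions_q (state_tuple : List (List Int)) : Prop :=
  ∃ r < 3, ∃ c < 3, r < state_tuple.length ∧
    (∀ row ∈ state_tuple.take r, row.length = 3 ∧ (0 : Int) ∉ row) ∧
    c < (state_tuple.getD r []).length ∧
    (state_tuple.getD r []).getD c 1 = 0 ∧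
    (∀ x ∈ (state_tuple.getD r []).take c, x ≠ 0)
instance (state_tuple : List (List Int)) : Decidable (Pre_get_valid_actions_q state_tuple) := by
  unfold Pre_get_valid_actions_q; infer_instance

def pvWitness_get_valid_actions_q : List (List Int) := [[1, 2, 3], [4, 0, 5], [6, 7, 8]]

def Spec_get_valid_actions_q (state_tuple : List (List Int)) (out : List Int) : Prop := out = get_valid_actions_q_alt state_tuple
instance (state_tuple : List (List Int)) (out : List Int) : Decidable (Spec_get_valid_actions_q state_tuple out) := by unfold Spec_get_valid_actions_q; infer_instance

-- ===== CLAIM (what is proved, stated in full; the proofs are below) =====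
def Claim_equal_get_valid_actions_q : Prop := ∀ (state_tuple : List (List Int)), Dom_get_valid_actions_q state_tuple → Pre_get_valid_actions_q state_tuple → Spec_get_valid_actions_q state_tuple (get_valid_actions_q state_tuple)

-- ===== LEMMAS AND PROOFS =====
theorem pvRange03 : PySem.List.pyRange 0 3 1 = [((0:Nat):Int), ((1:Nat):Int), ((2:Nat):Int)] := by decide

theorem pvGet0 {α : Type} (x0 : α) (t : List α) : PySem.List.pyGet? (x0 :: t) 0 = some x0 := by
  rw [show (0 : Int) = ((0 : Nat) : Int) by norm_num, PySem.List.pyGet?_natCast]; rfl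

theorem pvGet1 {α : Type} (x0 x1 : α) (t : List α) : PySem.List.pyGet? (x0 :: x1 :: t) 1 = some x1 := by
  rw [show (1 : Int) = ((1 : Nat) : Int) by norm_num, PySem.List.pyGet?_natCast]; rfl

theorem pvGet2 {α : Type} (x0 x1 x2 : α) (t : List α) : PySem.List.pyGet? (x0 :: x1 :: x2 :: t) 2 = some x2 := by
  rw [show (2 : Int) = ((2 : Nat) : Int) by norm_num, PySem.List.pyGet?_natCast]; rfl

-- ===== VERDICT (by name: the statement is the Claim_ definition above) =====
theorem get_valid_actions_q_spec : Claim_equal_get_valid_actions_q := by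
  intro st _ hpre
  obtain ⟨r, hr, c, hc, hlen, hprev, hclen, h0, hcpre⟩ := hpre
  unfold Spec_get_valid_actions_q get_valid_actions_q get_valid_actions_q_alt
  interval_cases r <;> interval_cases c
  · rcases st with _|⟨q0, st1⟩
    · simp at hlen
    rcases q0 with _|⟨y0, t1⟩
    · simp at hclen
    simp at h0
    subst h0
    simp [pvRange03, List.map_cons, List.map_nil, List.foldl_cons, List.foldl_nil, pvGet0, pvGet1, pvGet2, List.flatMap_cons, List.flatMap_nil, PySem.List.index?_eq_idxOf?, List.idxOf?, List.findIdx?, List.findIdx?.go, beq_iff_eq, pvActionsTable]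
  · rcases st with _|⟨q0, st1⟩
    · simp at hlen
    rcases q0 with _|⟨y0, t1⟩
    · simp at hclen
    rcases t1 with _|⟨y1, t2⟩
    · simp at hclen
    have hy0 : y0 ≠ 0 := hcpre y0 (by simp)
    simp at h0
    subst h0
    simp [pvRange03, List.map_cons, List.map_nil, List.foldl_cons, List.foldl_nil, pvGet0, pvGet1, pvGet2, List.flatMap_cons, List.flatMap_nil, PySem.List.index?_eq_idxOf?, List.idxOf?, List.findIdx?, List.findIdx?.go, beq_iff_eq, pvActionsTable, hy0]
  · rcases st with _|⟨q0, st1⟩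
    · simp at hlen
    rcases q0 with _|⟨y0, t1⟩
    · simp at hclen
    rcases t1 with _|⟨y1, t2⟩
    · simp at hclen
    rcases t2 with _|⟨y2, t3⟩
    · simp at hclen
    have hy0 : y0 ≠ 0 := hcpre y0 (by simp)
    have hy1 : y1 ≠ 0 := hcpre y1 (by simp)
    simp at h0
    subst h0
    simp [pvRange03, List.map_cons, List.map_nil, List.foldl_cons, List.foldl_nil, pvGet0, pvGet1, pvGet2, List.flatMap_cons, List.flatMap_nil, PySem.List.index?_eq_idxOf?, List.idxOf?, List.findIdx?, List.findIdx?.go, beq_iff_eq, pvActionsTable, hy0, hy1]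
  · rcases st with _|⟨q0, st1⟩
    · simp at hlen
    rcases st1 with _|⟨q1, st2⟩
    · simp at hlen
    obtain ⟨hl0, hm0⟩ := hprev q0 (by simp)
    obtain ⟨x00, x01, x02, rfl⟩ := List.length_eq_three.mp hl0
    have hn00 : x00 ≠ 0 := fun hh => hm0 (by simp [hh])
    have hn01 : x01 ≠ 0 := fun hh => hm0 (by simp [hh])
    have hn02 : x02 ≠ 0 := fun hh => hm0 (by simp [hh])
    rcases q1 with _|⟨y0, t1⟩
    · simp at hclen
    simp at h0
    subst h0
    simp [pvRange03, List.map_cons, List.map_nil, List.foldl_cons, List.foldl_nil, pvGet0, pvGet1, pvGet2, List.flatMap_cons, List.flatMap_nil, PySem.List.index?_eq_idxOf?, List.idxOf?, List.findIdx?, List.findIdx?.go, beq_iff_eq, pvActionsTable, hn00, hn01, hn02]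
  · rcases st with _|⟨q0, st1⟩
    · simp at hlen
    rcases st1 with _|⟨q1, st2⟩
    · simp at hlen
    obtain ⟨hl0, hm0⟩ := hprev q0 (by simp)
    obtain ⟨x00, x01, x02, rfl⟩ := List.length_eq_three.mp hl0
    have hn00 : x00 ≠ 0 := fun hh => hm0 (by simp [hh])
    have hn01 : x01 ≠ 0 := fun hh => hm0 (by simp [hh])
    have hn02 : x02 ≠ 0 := fun hh => hm0 (by simp [hh])
    rcases q1 with _|⟨y0, t1⟩
    · simp at hclen
    rcases t1 with _|⟨y1, t2⟩
    · simp at hclen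
    have hy0 : y0 ≠ 0 := hcpre y0 (by simp)
    simp at h0
    subst h0
    simp [pvRange03, List.map_cons, List.map_nil, List.foldl_cons, List.foldl_nil, pvGet0, pvGet1, pvGet2, List.flatMap_cons, List.flatMap_nil, PySem.List.index?_eq_idxOf?, List.idxOf?, List.findIdx?, List.findIdx?.go, beq_iff_eq, pvActionsTable, hn00, hn01, hn02, hy0]
  · rcases st with _|⟨q0, st1⟩
    · simp at hlen
    rcases st1 with _|⟨q1, st2⟩
    · simp at hlen
    obtain ⟨hl0, hm0⟩ := hprev q0 (by simp)
    obtain ⟨x00, x01, x02, rfl⟩ := List.length_eq_three.mp hl0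
    have hn00 : x00 ≠ 0 := fun hh => hm0 (by simp [hh])
    have hn01 : x01 ≠ 0 := fun hh => hm0 (by simp [hh])
    have hn02 : x02 ≠ 0 := fun hh => hm0 (by simp [hh])
    rcases q1 with _|⟨y0, t1⟩
    · simp at hclen
    rcases t1 with _|⟨y1, t2⟩
    · simp at hclen
    rcases t2 with _|⟨y2, t3⟩
    · simp at hclen
    have hy0 : y0 ≠ 0 := hcpre y0 (by simp)
    have hy1 : y1 ≠ 0 := hcpre y1 (by simp)
    simp at h0
    subst h0
    simp [pvRange03, List.map_cons, List.map_nil, List.foldl_cons, List.foldl_nil, pvGet0, pvGet1, pvGet2, List.flatMap_cons, List.flatMap_nil, PySem.List.index?_eq_idxOf?, List.idxOf?, List.findIdx?, List.findIdx?.go, beq_iff_eq, pvActionsTable, hn00, hn01, hn02, hy0, hy1]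
  · rcases st with _|⟨q0, st1⟩
    · simp at hlen
    rcases st1 with _|⟨q1, st2⟩
    · simp at hlen
    rcases st2 with _|⟨q2, st3⟩
    · simp at hlen
    obtain ⟨hl0, hm0⟩ := hprev q0 (by simp)
    obtain ⟨x00, x01, x02, rfl⟩ := List.length_eq_three.mp hl0
    have hn00 : x00 ≠ 0 := fun hh => hm0 (by simp [hh])
    have hn01 : x01 ≠ 0 := fun hh => hm0 (by simp [hh])
    have hn02 : x02 ≠ 0 := fun hh => hm0 (by simp [hh])
    obtain ⟨hl1, hm1⟩ := hprev q1 (by simp)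
    obtain ⟨x10, x11, x12, rfl⟩ := List.length_eq_three.mp hl1
    have hn10 : x10 ≠ 0 := fun hh => hm1 (by simp [hh])
    have hn11 : x11 ≠ 0 := fun hh => hm1 (by simp [hh])
    have hn12 : x12 ≠ 0 := fun hh => hm1 (by simp [hh])
    rcases q2 with _|⟨y0, t1⟩
    · simp at hclen
    simp at h0
    subst h0
    simp [pvRange03, List.map_cons, List.map_nil, List.foldl_cons, List.foldl_nil, pvGet0, pvGet1, pvGet2, List.flatMap_cons, List.flatMap_nil, PySem.List.index?_eq_idxOf?, List.idxOf?, List.findIdx?, List.findIdx?.go, beq_iff_eq, pvActionsTable, hn00, hn01, hn02, hn10, hn11, hn12]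
  · rcases st with _|⟨q0, st1⟩
    · simp at hlen
    rcases st1 with _|⟨q1, st2⟩
    · simp at hlen
    rcases st2 with _|⟨q2, st3⟩
    · simp at hlen
    obtain ⟨hl0, hm0⟩ := hprev q0 (by simp)
    obtain ⟨x00, x01, x02, rfl⟩ := List.length_eq_three.mp hl0
    have hn00 : x00 ≠ 0 := fun hh => hm0 (by simp [hh])
    have hn01 : x01 ≠ 0 := fun hh => hm0 (by simp [hh])
    have hn02 : x02 ≠ 0 := fun hh => hm0 (by simp [hh])
    obtain ⟨hl1, hm1⟩ := hprev q1 (by simp)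
    obtain ⟨x10, x11, x12, rfl⟩ := List.length_eq_three.mp hl1
    have hn10 : x10 ≠ 0 := fun hh => hm1 (by simp [hh])
    have hn11 : x11 ≠ 0 := fun hh => hm1 (by simp [hh])
    have hn12 : x12 ≠ 0 := fun hh => hm1 (by simp [hh])
    rcases q2 with _|⟨y0, t1⟩
    · simp at hclen
    rcases t1 with _|⟨y1, t2⟩
    · simp at hclen
    have hy0 : y0 ≠ 0 := hcpre y0 (by simp)
    simp at h0
    subst h0
    simp [pvRange03, List.map_cons, List.map_nil, List.foldl_cons, List.foldl_nil, pvGet0, pvGet1, pvGet2, List.flatMap_cons, List.flatMap_nil, PySem.List.index?_eq_idxOf?, List.idxOf?, List.findIdx?, List.findIdx?.go, beq_iff_eq, pvActionsTable, hn00, hn01, hn02, hn10, hn11, hn12, hy0]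
  · rcases st with _|⟨q0, st1⟩
    · simp at hlen
    rcases st1 with _|⟨q1, st2⟩
    · simp at hlen
    rcases st2 with _|⟨q2, st3⟩
    · simp at hlen
    obtain ⟨hl0, hm0⟩ := hprev q0 (by simp)
    obtain ⟨x00, x01, x02, rfl⟩ := List.length_eq_three.mp hl0
    have hn00 : x00 ≠ 0 := fun hh => hm0 (by simp [hh])
    have hn01 : x01 ≠ 0 := fun hh => hm0 (by simp [hh])
    have hn02 : x02 ≠ 0 := fun hh => hm0 (by simp [hh])
    obtain ⟨hl1, hm1⟩ := hprev q1 (by simp)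
    obtain ⟨x10, x11, x12, rfl⟩ := List.length_eq_three.mp hl1
    have hn10 : x10 ≠ 0 := fun hh => hm1 (by simp [hh])
    have hn11 : x11 ≠ 0 := fun hh => hm1 (by simp [hh])
    have hn12 : x12 ≠ 0 := fun hh => hm1 (by simp [hh])
    rcases q2 with _|⟨y0, t1⟩
    · simp at hclen
    rcases t1 with _|⟨y1, t2⟩
    · simp at hclen
    rcases t2 with _|⟨y2, t3⟩
    · simp at hclen
    have hy0 : y0 ≠ 0 := hcpre y0 (by simp)
    have hy1 : y1 ≠ 0 := hcpre y1 (by simp)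
    simp at h0
    subst h0
    simp [pvRange03, List.map_cons, List.map_nil, List.foldl_cons, List.foldl_nil, pvGet0, pvGet1, pvGet2, List.flatMap_cons, List.flatMap_nil, PySem.List.index?_eq_idxOf?, List.idxOf?, List.findIdx?, List.findIdx?.go, beq_iff_eq, pvActionsTable, hn00, hn01, hn02, hn10, hn11, hn12, hy0, hy1]
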